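-- pv_equiv track=rewrite | github.com/atropos-null/LS | py110/small_problems/easy_4/06_leadingsubstrings.py | leading_substrings
-- ===== SOURCE A (Python) =====
-- def leading_substrings(string):
--     temp1 = [char for char in string]
--     temp2 = []
--     for i in range(len(string)):
--         if temp2 == []:
--             temp2.append(temp1[0])
--         else:
--             temp2.append(temp2[-1] + temp1[i])
--     return temp2
-- ===== SOURCE B (Python) =====
-- def leading_substrings(string):
--     return [string[:i] for i in range(1, len(string) + 1)]
-- ===== Notes on version B (the rewrite author's own statement) =====
-- stated objective: simpler
-- what changed: B drops A's char list and running-prefix accumulator (each element built by appending one char to the previous) and instead computes each leading substring independently as the direct slice string[:i] in a single comprehension.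
import Mathlib
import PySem

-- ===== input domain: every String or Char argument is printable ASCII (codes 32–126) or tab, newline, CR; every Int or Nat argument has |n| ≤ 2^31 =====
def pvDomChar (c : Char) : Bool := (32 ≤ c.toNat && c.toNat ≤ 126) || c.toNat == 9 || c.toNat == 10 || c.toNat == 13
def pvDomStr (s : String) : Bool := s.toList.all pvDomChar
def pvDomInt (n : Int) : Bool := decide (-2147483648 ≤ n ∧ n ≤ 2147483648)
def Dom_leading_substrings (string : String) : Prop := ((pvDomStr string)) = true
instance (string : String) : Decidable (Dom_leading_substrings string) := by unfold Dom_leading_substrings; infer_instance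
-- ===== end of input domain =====

-- B replaces A's running-prefix accumulator with independent string[:i] slices (objective: simpler).


-- ===== PORT A =====
-- temp1 = [char for char in string]; loop over range(len(string)) with the accumulator temp2
def leading_substrings (string : String) : List String :=
  let temp1 : List String := string.toList.map (fun c => String.ofList [c])
  (PySem.List.pyRange 0 (PySem.Str.len string) 1).foldl
    (fun temp2 i =>
      if temp2 = [] then temp2 ++ [PySem.List.pyGetD temp1 0 ""]
      else temp2 ++ [PySem.List.pyGetD temp2 (-1) "" ++ PySem.List.pyGetD temp1 i ""]) []

-- ===== PORT B =====
-- [string[:i] for i in range(1, len(string) + 1)]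
def leading_substrings_alt (string : String) : List String :=
  (PySem.List.pyRange 1 (PySem.Str.len string + 1) 1).map
    (fun i => PySem.Str.slice string none (some i))

-- ===== PRECONDITION & SPEC =====
def Spec_leading_substrings (string : String) (out : List String) : Prop := out = leading_substrings_alt string
instance (string : String) (out : List String) : Decidable (Spec_leading_substrings string out) := by unfold Spec_leading_substrings; infer_instance

-- ===== CLAIM (what is proved, stated in full; the proofs are below) =====
def Claim_equal_leading_substrings : Prop := ∀ (string : String), Dom_leading_substrings string → Spec_leading_substrings string (leading_substrings string)

-- ===== LEMMAS AND PROOFS =====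

-- A's loop over range(0, k) builds exactly the first k leading substrings.
theorem leading_loop_eq (cs : List Char) (k : Nat) (hk : k ≤ cs.length) :
    (PySem.List.pyRange 0 (k : Int) 1).foldl
      (fun temp2 i =>
        if temp2 = [] then temp2 ++ [PySem.List.pyGetD (cs.map (fun c => String.ofList [c])) 0 ""]
        else temp2 ++ [PySem.List.pyGetD temp2 (-1) "" ++
                       PySem.List.pyGetD (cs.map (fun c => String.ofList [c])) i ""]) []
      = (List.range k).map (fun j => String.ofList (cs.take (j + 1))) := by
  induction k with
  | zero => simp [PySem.List.pyRange_one_eq_nil]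
  | succ k ih =>
    have hk' : k ≤ cs.length := Nat.le_of_succ_le hk
    have hsplit : PySem.List.pyRange 0 ((k + 1 : Nat) : Int) 1
        = PySem.List.pyRange 0 (k : Int) 1 ++ [(k : Int)] := by
      have := PySem.List.pyRange_one_succ_right (a := 0) (b := (k : Int)) (by positivity)
      push_cast
      exact this
    rw [hsplit, List.foldl_append, ih hk', List.range_succ, List.map_append]
    have hklt : k < cs.length := hk
    cases k with
    | zero =>
      obtain ⟨c, t, rfl⟩ : ∃ c t, cs = c :: t := by
        cases cs with
        | nil => simp at hklt
        | cons c t => exact ⟨c, t, rfl⟩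
      simp [PySem.List.pyGetD_zero_cons]
    | succ j =>
      have hne : (List.range (j + 1)).map (fun j => String.ofList (cs.take (j + 1))) ≠ [] := by
        simp [List.range_succ]
      simp only [List.foldl_cons, List.foldl_nil]
      rw [if_neg hne]
      rw [List.range_succ, List.map_append, List.map_cons, List.map_nil,
        PySem.List.pyGetD_neg_one_append_singleton]
      rw [PySem.List.pyGetD_natCast, List.getD_eq_getElem _ _ (by simpa using hklt), List.getElem_map]
      rw [← String.ofList_append]
      have h1 : cs.take (j + 1 + 1) = cs.take (j + 1) ++ [cs[j + 1]] := by
        rw [List.take_add_one, List.getElem?_eq_getElem hklt]; simp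
      simp only [List.map_cons, List.map_nil, h1]

-- B's range(1, n+1) of slices is the same list of leading substrings.
theorem leading_alt_eq (string : String) :
    leading_substrings_alt string
      = (List.range string.toList.length).map (fun j => String.ofList (string.toList.take (j + 1))) := by
  unfold leading_substrings_alt
  rw [show PySem.Str.len string + 1 = ((string.toList.length + 1 : Nat) : Int) by
    simp [PySem.Str.len_eq]]
  rw [PySem.List.pyRange_one]
  rw [show ((((string.toList.length + 1 : Nat) : Int)) - 1).toNat = string.toList.length by omega]
  rw [List.map_map]
  apply List.map_congr_left
  intro j hj
  have hj' : j < string.toList.length := List.mem_range.mp hj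
  have hb : (1 : Int) + (j : Int) = ((j + 1 : Nat) : Int) := by push_cast; ring
  apply String.toList_injective
  simp only [Function.comp_apply, String.toList_ofList]
  rw [show (PySem.Str.slice string none (some (1 + (j : Int)))).toList
      = PySem.List.slice string.toList none (some (1 + (j : Int))) by simp [PySem.Str.slice]]
  rw [PySem.List.slice_to _ (by positivity)]
  congr 1
  omega

-- ===== VERDICT (by name: the statement is the Claim_ definition above) =====
theorem leading_substrings_spec : Claim_equal_leading_substrings := by
  intro string _
  unfold Spec_leading_substrings leading_substrings
  rw [leading_alt_eq]
  simp only [PySem.Str.len_eq]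
  exact leading_loop_eq string.toList string.toList.length le_rfl
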